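-- pv_equiv track=rewrite | github.com/Robertus567/Repository-Jap-Robertus-K.S-Semester-2-Alpro2 | Challenge 3 Alpro Week 5.py | find_longest_circuit
-- ===== SOURCE A (Python) =====
-- graph = {
--     'A': ['B', 'C', 'D'],
--     'B': ['A', 'E'],
--     'C': ['A', 'F', 'K'],
--     'D': ['A', 'J'],
--     'E': ['B', 'G', 'K'],
--     'F': ['C', 'I'],
--     'G': ['E', 'H'],
--     'H': ['G', 'K'],
--     'I': ['F', 'J', 'K'],
--     'J': ['D', 'I'],
--     'K': ['C', 'E', 'H', 'I']
-- }
--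
-- def find_all_paths(start, end, path=[]):
--     """Find all paths from start to end node using DFS"""
--     path = path + [start]
--     if start == end:
--         return [path]
--     paths = []
--     for neighbor in graph[start]:
--         if neighbor not in path:
--             new_paths = find_all_paths(neighbor, end, path)
--             paths.extend(new_paths)
--     return paths
--
-- def find_longest_circuit(start, end):
--     """Find the longest circuit from start to end and back to start"""
--     paths = find_all_paths(start, end)
--     if not paths:
--         return None
--
--     circuits = []
--     for path in paths:
--         # Check if end can connect back to start (completing the circuit)
--         if start in graph[end]:
--             circuits.append(path + [start])
--
--     if not circuits:
--         return None
--
--     # Return the longest circuit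
--     return max(circuits, key=len)
-- ===== SOURCE B (Python) =====
-- graph = {
--     'A': ['B', 'C', 'D'],
--     'B': ['A', 'E'],
--     'C': ['A', 'F', 'K'],
--     'D': ['A', 'J'],
--     'E': ['B', 'G', 'K'],
--     'F': ['C', 'I'],
--     'G': ['E', 'H'],
--     'H': ['G', 'K'],
--     'I': ['F', 'J', 'K'],
--     'J': ['D', 'I'],
--     'K': ['C', 'E', 'H', 'I']
-- }
--
-- def find_longest_circuit(start, end):
--     """Single DFS tracking only the longest simple start->end path (first
--     longest wins); the back-edge check runs once, only if a path exists."""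
--     def dfs(node, path, best):
--         path = path + [node]
--         if node == end:
--             if best is None or len(path) > len(best):
--                 return path
--             return best
--         for neighbor in graph[node]:
--             if neighbor not in path:
--                 best = dfs(neighbor, path, best)
--         return best
--
--     best = dfs(start, [], None)
--     if best is None:
--         return None
--     if start in graph[end]:
--         return best + [start]
--     return None
-- ===== Notes on version B (the rewrite author's own statement) =====
-- stated objective: alternative
-- what changed: Replaced enumerate-all-paths-into-a-list + separate circuits loop + max(key=len) by a single DFS that carries only the running longest path (strict-> update preserves the first-longest tie-break) and performs the back-edge check once after the search.
import Mathlib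
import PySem

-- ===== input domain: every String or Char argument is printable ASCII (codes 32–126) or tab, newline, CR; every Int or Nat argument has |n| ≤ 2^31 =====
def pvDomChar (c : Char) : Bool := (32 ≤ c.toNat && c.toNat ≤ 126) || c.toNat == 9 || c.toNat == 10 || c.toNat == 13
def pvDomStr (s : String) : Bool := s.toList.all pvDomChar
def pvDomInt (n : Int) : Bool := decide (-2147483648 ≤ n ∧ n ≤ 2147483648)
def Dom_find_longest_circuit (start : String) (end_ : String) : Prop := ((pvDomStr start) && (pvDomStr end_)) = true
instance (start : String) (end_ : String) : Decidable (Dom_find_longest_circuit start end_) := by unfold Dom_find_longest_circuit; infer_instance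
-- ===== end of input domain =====

-- B replaces A's enumerate-all-paths + filter + max pipeline by a single DFS that
-- keeps only the running longest path (same neighbor order, first longest wins);
-- objective: alternative decomposition (and it avoids materializing every path).

-- ===== PORT A =====
-- the module-level graph constant
def pvGraph : PySem.Dict String (List String) := PySem.Dict.ofList
  [("A", ["B", "C", "D"]), ("B", ["A", "E"]), ("C", ["A", "F", "K"]),
   ("D", ["A", "J"]), ("E", ["B", "G", "K"]), ("F", ["C", "I"]),
   ("G", ["E", "H"]), ("H", ["G", "K"]), ("I", ["F", "J", "K"]),
   ("J", ["D", "I"]), ("K", ["C", "E", "H", "I"])]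

-- graph[n]; exact whenever n is a key (guaranteed by Pre_ and reachability on admitted inputs;
-- the Python raises KeyError otherwise, which Pre_ excludes)
def pvNbrs (n : String) : List String := PySem.Dict.getD pvGraph n []

-- find_all_paths; fuel bounds the recursion depth (path holds distinct nodes, ≤ 12 of them,
-- so fuel 12 is never exhausted on admitted inputs) — a totality guard only, not an algorithm change
def pvFindAllPaths : Nat → String → String → List String → List (List String)
  | 0, _, _, _ => []
  | fuel + 1, start, end_, path =>
    let path := path ++ [start]
    if start = end_ then [path]
    else (pvNbrs start).foldl
      (fun paths neighbor =>
        if neighbor ∈ path then paths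
        else paths ++ pvFindAllPaths fuel neighbor end_ path) []

def find_longest_circuit (start : String) (end_ : String) : Option (List String) :=
  let paths := pvFindAllPaths 12 start end_ []
  if paths = [] then none
  else
    let circuits := paths.foldl
      (fun circuits path =>
        if start ∈ pvNbrs end_ then circuits ++ [path ++ [start]] else circuits) []
    if circuits = [] then none
    else PySem.List.max? circuits List.length

-- ===== PORT B =====
-- single DFS carrying the running best path (strictly-longer updates ⇒ first longest wins)
def pvDfsBest : Nat → String → String → List String → Option (List String) → Option (List String)
  | 0, _, _, _, best => best
  | fuel + 1, node, end_, path, best =>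
    let path := path ++ [node]
    if node = end_ then
      match best with
      | none => some path
      | some b => if b.length < path.length then some path else some b
    else (pvNbrs node).foldl
      (fun best neighbor =>
        if neighbor ∈ path then best
        else pvDfsBest fuel neighbor end_ path best) best

def find_longest_circuit_alt (start : String) (end_ : String) : Option (List String) :=
  match pvDfsBest 12 start end_ [] none with
  | none => none
  | some best => if start ∈ pvNbrs end_ then some (best ++ [start]) else none

-- ===== PRECONDITION & SPEC =====
-- Pre_ excludes exactly the inputs where the Python A raises KeyError: start not a key of the
-- graph (then graph[start], or graph[end] when start == end, fails); on every other input A returns.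
def Pre_find_longest_circuit (start : String) (end_ : String) : Prop :=
  start ∈ (["A", "B", "C", "D", "E", "F", "G", "H", "I", "J", "K"] : List String)
instance (start : String) (end_ : String) : Decidable (Pre_find_longest_circuit start end_) := by
  unfold Pre_find_longest_circuit; infer_instance

def pvWitness_find_longest_circuit : String × String := ("A", "K")

def Spec_find_longest_circuit (start : String) (end_ : String) (out : Option (List String)) : Prop := out = find_longest_circuit_alt start end_
instance (start : String) (end_ : String) (out : Option (List String)) : Decidable (Spec_find_longest_circuit start end_ out) := by unfold Spec_find_longest_circuit; infer_instance

-- ===== CLAIM (what is proved, stated in full; the proofs are below) =====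
def Claim_equal_find_longest_circuit : Prop := ∀ (start : String) (end_ : String), Dom_find_longest_circuit start end_ → Pre_find_longest_circuit start end_ → Spec_find_longest_circuit start end_ (find_longest_circuit start end_)

-- ===== LEMMAS AND PROOFS =====

-- the running-best update step (identical to PySem.List.max?'s fold step at key = List.length)
def pvStep (acc : Option (List String)) (x : List String) : Option (List String) :=
  match acc with
  | none => some x
  | some m => if m.length < x.length then some x else some m

theorem pvMax_eq_foldl (xs : List (List String)) :
    PySem.List.max? xs List.length = xs.foldl pvStep none := by
  unfold PySem.List.max?
  congr 1
  funext acc x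
  cases acc <;> rfl

-- B's DFS equals folding the running-best step over A's list of paths
theorem pvDfs_eq (fuel : Nat) :
    ∀ (node end_ : String) (path : List String) (best : Option (List String)),
      pvDfsBest fuel node end_ path best
        = (pvFindAllPaths fuel node end_ path).foldl pvStep best := by
  induction fuel with
  | zero => intro node end_ path best; rfl
  | succ fuel ih =>
    intro node end_ path best
    simp only [pvDfsBest, pvFindAllPaths]
    by_cases h : node = end_
    · simp only [h, if_true]
      cases best <;> rfl
    · simp only [if_neg h]
      -- fold over the neighbor list, generalizing both accumulators
      have aux : ∀ (ns : List String) (acc : List (List String)) (best : Option (List String)),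
          ns.foldl (fun best neighbor =>
              if neighbor ∈ path ++ [node] then best
              else pvDfsBest fuel neighbor end_ (path ++ [node]) best)
            (acc.foldl pvStep best)
          = (ns.foldl (fun paths neighbor =>
              if neighbor ∈ path ++ [node] then paths
              else paths ++ pvFindAllPaths fuel neighbor end_ (path ++ [node])) acc).foldl
              pvStep best := by
        intro ns
        induction ns with
        | nil => intro acc best; rfl
        | cons nb ns ihn =>
          intro acc best
          simp only [List.foldl]
          by_cases hnb : nb ∈ path ++ [node]
          · simpa [hnb] using ihn acc best
          · simp only [if_neg hnb]
            rw [ih nb end_ (path ++ [node]) (acc.foldl pvStep best), ← List.foldl_append]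
            exact ihn (acc ++ pvFindAllPaths fuel nb end_ (path ++ [node])) best
      simpa using aux (pvNbrs node) [] best

-- folding the step from a some-accumulator never yields none
theorem pvFoldl_step_some (P : List (List String)) :
    ∀ (q : List String), ∃ r, P.foldl pvStep (some q) = some r := by
  induction P with
  | nil => intro q; exact ⟨q, rfl⟩
  | cons p P ih =>
    intro q
    simp only [List.foldl, pvStep]
    split_ifs <;> apply ih

-- the running best commutes with appending the same suffix to every path
theorem pvFoldl_step_map (s : String) (P : List (List String)) :
    ∀ (best : Option (List String)),
      (P.map (· ++ [s])).foldl pvStep (best.map (· ++ [s]))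
        = (P.foldl pvStep best).map (· ++ [s]) := by
  induction P with
  | nil => intro best; rfl
  | cons p P ih =>
    intro best
    simp only [List.map, List.foldl]
    have hstep : pvStep (best.map (· ++ [s])) (p ++ [s]) = (pvStep best p).map (· ++ [s]) := by
      cases best with
      | none => rfl
      | some m =>
        simp only [pvStep, Option.map_some, List.length_append, List.length_cons,
          List.length_nil]
        by_cases h : m.length < p.length
        · rw [if_pos (by omega), if_pos h]; rfl
        · rw [if_neg (by omega), if_neg h]; rfl
    rw [hstep, ih (pvStep best p)]

-- the constant-test circuits loop: all paths extended, or nothing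
theorem pvCircuits_eq (start end_ : String) (P : List (List String)) :
    P.foldl (fun circuits path =>
        if start ∈ pvNbrs end_ then circuits ++ [path ++ [start]] else circuits) []
      = if start ∈ pvNbrs end_ then P.map (· ++ [start]) else [] := by
  by_cases h : start ∈ pvNbrs end_
  · simp only [if_pos h]
    simpa using PySem.List.foldl_append_singleton_eq_map (l := P) (f := (· ++ [start])) (acc := [])
  · simp only [if_neg h]
    induction P with
    | nil => rfl
    | cons p P ih => simpa using ih

-- ===== VERDICT (by name: the statement is the Claim_ definition above) =====
theorem find_longest_circuit_spec : Claim_equal_find_longest_circuit := by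
  intro start end_ _ _
  unfold Spec_find_longest_circuit find_longest_circuit find_longest_circuit_alt
  dsimp only
  rw [pvDfs_eq, pvCircuits_eq]
  cases hP : pvFindAllPaths 12 start end_ [] with
  | nil => simp
  | cons p P =>
    obtain ⟨r, hr⟩ := pvFoldl_step_some P p
    have hsome : (p :: P).foldl pvStep none = some r := by
      simpa [pvStep] using hr
    by_cases hc : start ∈ pvNbrs end_
    · have hmap := pvFoldl_step_map start (p :: P) none
      rw [hsome] at hmap
      simp [hc, hsome, pvMax_eq_foldl]
      simpa using hmap
    · simp [hc, hsome]
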